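-- pv_equiv track=rewrite | github.com/CeciliaRava1/-SySL-2023_cecilia_rava | aritmetica.py | value_string
-- ===== SOURCE A (Python) =====
-- init_state = 'digit'
--
-- transitions = {
--     ('digit', 'digit'): 'digit',
--     ('digit', 'operator'): 'operator',
--     ('operator', 'digit'): 'digit',
-- }
--
-- def transition(state, symbol):
--     return transitions.get((state, symbol), 'error')
--
-- def value_string(string):
--     actual_state = init_state
--     for char in string:
--         if char.isdigit():
--             actual_state = transition(actual_state, 'digit')
--         elif char in {'+', '-', '*', '/'}:
--             actual_state = transition(actual_state, 'operator')
--         else: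
--             actual_state = 'error'
--             break
--
--     return actual_state
-- ===== SOURCE B (Python) =====
-- OPS = '+-*/'
--
-- def value_string(string):
--     if any(not c.isdigit() and c not in OPS for c in string):
--         return 'error'
--     if any(a in OPS and b in OPS for a, b in zip(string, string[1:])):
--         return 'error'
--     return 'operator' if string and string[-1] in OPS else 'digit'
-- ===== Notes on version B (the rewrite author's own statement) =====
-- stated objective: idiomatic
-- what changed: Replaced the per-character state-machine loop with whole-string pattern checks: reject on any invalid character or any adjacent operator pair, otherwise classify by the last character.
import Mathlib
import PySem

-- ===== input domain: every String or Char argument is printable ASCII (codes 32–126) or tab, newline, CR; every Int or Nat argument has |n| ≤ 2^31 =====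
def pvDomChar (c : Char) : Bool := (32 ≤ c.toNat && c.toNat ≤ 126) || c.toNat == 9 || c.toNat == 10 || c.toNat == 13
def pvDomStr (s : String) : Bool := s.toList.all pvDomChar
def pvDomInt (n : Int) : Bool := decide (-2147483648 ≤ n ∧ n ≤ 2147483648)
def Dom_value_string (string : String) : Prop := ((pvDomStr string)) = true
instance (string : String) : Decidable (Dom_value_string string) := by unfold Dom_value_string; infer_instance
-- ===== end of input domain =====

-- B replaces A's per-character state-machine loop with whole-string pattern checks
-- (invalid character / adjacent operator pair / last-character class); same cost, more idiomatic.

-- ===== PORT A =====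
def initState : String := "digit"

def transitionsA : PySem.Dict (String × String) String :=
  PySem.Dict.ofList [(("digit", "digit"), "digit"),
                     (("digit", "operator"), "operator"),
                     (("operator", "digit"), "digit")]

def transitionA (state symbol : String) : String :=
  PySem.Dict.getD transitionsA (state, symbol) "error"

def goA : List Char → String → String
  | [], st => st
  | c :: cs, st =>
    if PySem.Chars.isdigit c then goA cs (transitionA st "digit")
    else if c == '+' || c == '-' || c == '*' || c == '/' then goA cs (transitionA st "operator")
    else "error"   -- actual_state = 'error'; break

def value_string (string : String) : String :=
  goA string.toList initState

-- ===== PORT B =====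
-- Python's module constant OPS = '+-*/' as its character list; 'c in OPS' for a char c is membership
def opsB : List Char := ['+', '-', '*', '/']

def value_string_alt (string : String) : String :=
  if string.toList.any (fun c => !(PySem.Chars.isdigit c) && !(opsB.contains c)) then "error"
  else if (string.toList.zip string.toList.tail).any (fun p => opsB.contains p.1 && opsB.contains p.2) then "error"
  else match string.toList.getLast? with   -- 'operator' if string and string[-1] in OPS else 'digit'
       | some c => if opsB.contains c then "operator" else "digit"
       | none => "digit"

-- ===== PRECONDITION & SPEC =====
def Spec_value_string (string : String) (out : String) : Prop := out = value_string_alt string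
instance (string : String) (out : String) : Decidable (Spec_value_string string out) := by unfold Spec_value_string; infer_instance

-- ===== CLAIM (what is proved, stated in full; the proofs are below) =====
def Claim_equal_value_string : Prop := ∀ (string : String), Dom_value_string string → Spec_value_string string (value_string string)

-- ===== LEMMAS AND PROOFS =====

def invB (l : List Char) : Bool := l.any (fun c => !(PySem.Chars.isdigit c) && !(opsB.contains c))
def adjB (l : List Char) : Bool := (l.zip l.tail).any (fun p => opsB.contains p.1 && opsB.contains p.2)
def lastOp (l : List Char) : Bool :=
  match l.getLast? with
  | some c => opsB.contains c
  | none => false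

def resB (st : String) (l : List Char) : String :=
  if invB l || adjB l then "error"
  else if l.isEmpty then st
  else if lastOp l then "operator" else "digit"

theorem digit_not_op {c : Char} (h : PySem.Chars.isdigit c = true) : opsB.contains c = false := by
  cases hc : opsB.contains c with
  | false => rfl
  | true =>
    exfalso
    have hm : c ∈ opsB := by simpa using hc
    fin_cases hm <;> exact absurd h (by decide)

theorem op_not_digit {c : Char} (h : opsB.contains c = true) : PySem.Chars.isdigit c = false := by
  have hm : c ∈ opsB := by simpa using h
  fin_cases hm <;> decide

theorem contains_eq (c : Char) : opsB.contains c = (c == '+' || c == '-' || c == '*' || c == '/') := by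
  rw [Bool.eq_iff_iff]
  simp [opsB]
  tauto

theorem invB_cons (c : Char) (cs : List Char) :
    invB (c :: cs) = ((!(PySem.Chars.isdigit c) && !(opsB.contains c)) || invB cs) := rfl

theorem adjB_cons_cons (c b : Char) (bs : List Char) :
    adjB (c :: b :: bs) = ((opsB.contains c && opsB.contains b) || adjB (b :: bs)) := rfl

theorem goA_error (l : List Char) : goA l "error" = "error" := by
  induction l with
  | nil => rfl
  | cons c cs ih =>
    simp only [goA]
    split_ifs <;>
      first
        | rfl
        | rw [show transitionA "error" "digit" = "error" from by decide, ih]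
        | rw [show transitionA "error" "operator" = "error" from by decide, ih]

-- dropping a leading digit never changes B's classification (the result is "digit" either way if the rest is empty)
theorem resB_digit_drop {c : Char} (cs : List Char) (hd : PySem.Chars.isdigit c = true) :
    resB "digit" (c :: cs) = resB "digit" cs ∧ resB "operator" (c :: cs) = resB "digit" cs := by
  have hop := digit_not_op hd
  cases cs with
  | nil =>
    have hi : invB [c] = false := by rw [invB_cons, hd, hop]; rfl
    constructor <;>
      simp [resB, hi, show adjB [c] = false from rfl, show lastOp [c] = false from hop,
            show invB [] = false from rfl, show adjB [] = false from rfl]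
  | cons b bs =>
    have hinv : invB (c :: b :: bs) = invB (b :: bs) := by
      rw [invB_cons, hd, hop]; rfl
    have hadj : adjB (c :: b :: bs) = adjB (b :: bs) := by
      rw [adjB_cons_cons, hop]; rfl
    have hlast : lastOp (c :: b :: bs) = lastOp (b :: bs) := by
      simp [lastOp, List.getLast?_cons_cons]
    constructor <;> simp only [resB, hinv, hadj, hlast, List.isEmpty_cons] <;> simp

theorem goA_cons (c : Char) (cs : List Char) (st : String) :
    goA (c :: cs) st =
      (if PySem.Chars.isdigit c then goA cs (transitionA st "digit")
       else if c == '+' || c == '-' || c == '*' || c == '/' then goA cs (transitionA st "operator")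
       else "error") := rfl

def headOp (l : List Char) : Bool :=
  match l.head? with
  | some c => opsB.contains c
  | none => false

-- from state "operator", a leading operator in the rest is the only extra error path
theorem goA_main (l : List Char) :
    goA l "digit" = resB "digit" l ∧
    goA l "operator" = (if headOp l then "error" else resB "operator" l) := by
  induction l with
  | nil => constructor <;> rfl
  | cons c cs ih =>
    obtain ⟨ihd, iho⟩ := ih
    by_cases hd : PySem.Chars.isdigit c = true
    · -- digit char: A moves (back) to state "digit"
      have hop := digit_not_op hd
      obtain ⟨h1, h2⟩ := resB_digit_drop cs hd
      have hh : headOp (c :: cs) = false := hop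
      constructor
      · rw [goA_cons, if_pos hd, show transitionA "digit" "digit" = "digit" from by decide, ihd, h1]
      · rw [goA_cons, if_pos hd, show transitionA "operator" "digit" = "digit" from by decide,
            ihd, hh, if_neg (by simp), h2]
    · by_cases ho : (c == '+' || c == '-' || c == '*' || c == '/') = true
      · -- operator char
        have hops : opsB.contains c = true := by rw [contains_eq]; exact ho
        have hh : headOp (c :: cs) = true := hops
        have hndig : PySem.Chars.isdigit c = false := op_not_digit hops
        constructor
        · rw [goA_cons, if_neg (by simp [hndig]), if_pos ho,
              show transitionA "digit" "operator" = "operator" from by decide, iho]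
          -- compare "if headOp cs then error else resB operator cs" with resB "digit" (c::cs)
          cases cs with
          | nil =>
            have hi : invB [c] = false := by rw [invB_cons, hndig, hops]; rfl
            simp [headOp, resB, hi, show adjB [c] = false from rfl,
                  show lastOp [c] = true from hops,
                  show invB [] = false from rfl, show adjB [] = false from rfl]
          | cons b bs =>
            have hinv : invB (c :: b :: bs) = invB (b :: bs) := by
              rw [invB_cons, hndig, hops]; rfl
            have hadj : adjB (c :: b :: bs) = (opsB.contains b || adjB (b :: bs)) := by
              rw [adjB_cons_cons, hops]; rfl
            cases hb : opsB.contains b with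
            | true =>
              have hhb : headOp (b :: bs) = true := hb
              rw [hhb, if_pos rfl]
              simp only [resB, hinv, hadj, hb, Bool.true_or, Bool.or_true]
              simp
            | false =>
              have hhb : headOp (b :: bs) = false := hb
              rw [hhb, if_neg (by simp)]
              have hlast : lastOp (c :: b :: bs) = lastOp (b :: bs) := by
                simp [lastOp, List.getLast?_cons_cons]
              simp only [resB, hinv, hadj, hb, hlast, Bool.false_or, List.isEmpty_cons]
              simp
        · rw [goA_cons, if_neg (by simp [hndig]), if_pos ho,
              show transitionA "operator" "operator" = "error" from by decide, goA_error,
              hh, if_pos rfl]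
      · -- invalid char: both sides "error"
        have hops : opsB.contains c = false := by rw [contains_eq]; simpa using ho
        have hdeq : PySem.Chars.isdigit c = false := by simpa using hd
        have hinv : invB (c :: cs) = true := by
          rw [invB_cons, hdeq, hops]; rfl
        have hres : ∀ st, resB st (c :: cs) = "error" := by
          intro st; simp [resB, hinv]
        have hh : headOp (c :: cs) = false := hops
        constructor
        · rw [goA_cons, if_neg hd, if_neg (by simpa using ho), hres]
        · rw [goA_cons, if_neg hd, if_neg (by simpa using ho), hh, if_neg (by simp), hres]

theorem alt_eq_resB (s : String) : value_string_alt s = resB "digit" s.toList := by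
  unfold value_string_alt resB
  rw [show (s.toList.any fun c => !(PySem.Chars.isdigit c) && !(opsB.contains c)) = invB s.toList from rfl,
      show ((s.toList.zip s.toList.tail).any fun p => opsB.contains p.1 && opsB.contains p.2) = adjB s.toList from rfl]
  cases hinv : invB s.toList with
  | true => simp
  | false =>
    cases hadj : adjB s.toList with
    | true => simp
    | false =>
      cases hl : s.toList.getLast? with
      | none =>
        have : s.toList = [] := by simpa using hl
        simp [this]
      | some c =>
        have hne : s.toList.isEmpty = false := by
          cases h : s.toList with
          | nil => rw [h] at hl; simp at hl
          | cons a as => rfl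
        simp [lastOp, hl, hne]

-- ===== VERDICT (by name: the statement is the Claim_ definition above) =====
theorem value_string_spec : Claim_equal_value_string := by
  intro s _
  unfold Spec_value_string value_string initState
  rw [(goA_main s.toList).1, alt_eq_resB]
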